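-- pv_equiv track=rewrite | github.com/developerlee79/ps-leetcode | string/leetcode_1417.py | reformat
-- ===== SOURCE A (Python) =====
-- def reformat(s):
--     letters = []
--     digits = []
--
--     for c in s:
--         if c.isdigit():
--             digits.append(c)
--         else:
--             letters.append(c)
--
--     reformatted_str = ""
--
--     n = len(letters)
--     m = len(digits)
--
--     if abs(n - m) > 1:
--         return reformatted_str
--
--     if n == m:
--         while letters:
--             reformatted_str += letters.pop()
--             reformatted_str += digits.pop()
--     elif n > m:
--         while digits:
--             reformatted_str += letters.pop()
--             reformatted_str += digits.pop()
--         reformatted_str += letters.pop()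
--     else:
--         while letters:
--             reformatted_str += digits.pop()
--             reformatted_str += letters.pop()
--         reformatted_str += digits.pop()
--
--     return reformatted_str
-- ===== SOURCE B (Python) =====
-- def reformat(s):
--     letters = [c for c in reversed(s) if not c.isdigit()]
--     digits = [c for c in reversed(s) if c.isdigit()]
--     if abs(len(letters) - len(digits)) > 1:
--         return ""
--     a, b = (digits, letters) if len(digits) > len(letters) else (letters, digits)
--     out = []
--     for x, y in zip(a, b):
--         out.append(x)
--         out.append(y)
--     out.extend(a[len(b):])
--     return "".join(out)
-- ===== Notes on version B (the rewrite author's own statement) =====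
-- stated objective: simpler
-- what changed: Replaces A's three separate destructive pop-from-end while-loops (one per length relationship) with two reversed-filter comprehensions, a single leader selection, one zip-based interleave pass and a tail slice.
import Mathlib
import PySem

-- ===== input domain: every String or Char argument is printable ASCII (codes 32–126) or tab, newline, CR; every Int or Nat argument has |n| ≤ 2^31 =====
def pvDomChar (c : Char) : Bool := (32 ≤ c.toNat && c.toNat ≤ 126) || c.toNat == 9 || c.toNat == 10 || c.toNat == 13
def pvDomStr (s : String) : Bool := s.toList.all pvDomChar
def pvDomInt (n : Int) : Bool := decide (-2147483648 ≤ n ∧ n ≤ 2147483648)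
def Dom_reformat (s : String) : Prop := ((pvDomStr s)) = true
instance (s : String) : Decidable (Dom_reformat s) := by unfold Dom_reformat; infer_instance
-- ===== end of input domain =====

-- B replaces A's three pop-from-end while-loops with two filters, one leader pick and one zip interleave (objective: simpler).
-- ===== PORT A =====
-- while letters: acc += letters.pop(); acc += digits.pop()   (digits.pop on [] would raise; unreachable since the loop runs only with equal lengths — default ' ' is dead code)
def pvLoop1 (letters digits : List Char) (acc : String) : String :=
  if letters = [] then acc
  else
    pvLoop1 letters.dropLast digits.dropLast
      ((acc ++ String.ofList [letters.getLastD ' ']) ++ String.ofList [digits.getLastD ' '])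
termination_by letters.length
decreasing_by simp_all [List.length_dropLast, List.length_pos_iff]

-- while digits: acc += letters.pop(); acc += digits.pop(); returns acc and the remaining letters (letters.pop on [] unreachable: n > m here)
def pvLoop2 (letters digits : List Char) (acc : String) : String × List Char :=
  if digits = [] then (acc, letters)
  else
    pvLoop2 letters.dropLast digits.dropLast
      ((acc ++ String.ofList [letters.getLastD ' ']) ++ String.ofList [digits.getLastD ' '])
termination_by digits.length
decreasing_by simp_all [List.length_dropLast, List.length_pos_iff]

-- while letters: acc += digits.pop(); acc += letters.pop(); returns acc and the remaining digits
def pvLoop3 (letters digits : List Char) (acc : String) : String × List Char :=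
  if letters = [] then (acc, digits)
  else
    pvLoop3 letters.dropLast digits.dropLast
      ((acc ++ String.ofList [digits.getLastD ' ']) ++ String.ofList [letters.getLastD ' ']) 
termination_by letters.length
decreasing_by simp_all [List.length_dropLast, List.length_pos_iff]

def reformat (s : String) : String :=
  let p := s.toList.foldl
    (fun (ld : List Char × List Char) c =>
      if PySem.Chars.isdigit c then (ld.1, ld.2 ++ [c]) else (ld.1 ++ [c], ld.2))
    ([], [])
  let letters := p.1
  let digits := p.2
  let n : Int := letters.length
  let m : Int := digits.length
  if (n - m).natAbs > 1 then ""
  else if n = m then pvLoop1 letters digits ""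
  else if n > m then
    let r := pvLoop2 letters digits ""
    r.1 ++ String.ofList [r.2.getLastD ' ']
  else
    let r := pvLoop3 letters digits ""
    r.1 ++ String.ofList [r.2.getLastD ' ']

-- ===== PORT B =====
def reformat_alt (s : String) : String :=
  let letters := s.toList.reverse.filter (fun c => !PySem.Chars.isdigit c)
  let digits := s.toList.reverse.filter (fun c => PySem.Chars.isdigit c)
  if ((letters.length : Int) - digits.length).natAbs > 1 then ""
  else
    let ab := if digits.length > letters.length then (digits, letters) else (letters, digits)
    let out := (ab.1.zip ab.2).foldl (fun (out : List Char) p => out ++ [p.1, p.2]) []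
    String.ofList (out ++ ab.1.drop ab.2.length)

-- ===== PRECONDITION & SPEC =====
def Spec_reformat (s : String) (out : String) : Prop := out = reformat_alt s
instance (s : String) (out : String) : Decidable (Spec_reformat s out) := by unfold Spec_reformat; infer_instance

-- ===== CLAIM (what is proved, stated in full; the proofs are below) =====
def Claim_equal_reformat : Prop := ∀ (s : String), Dom_reformat s → Spec_reformat s (reformat s)

-- ===== LEMMAS AND PROOFS =====
def pvFlat (a b : List Char) : List Char := (a.zip b).flatMap (fun p => [p.1, p.2])

theorem pvOfList_cons₂ (x y : Char) (r : List Char) :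
    String.ofList (x :: y :: r) = String.ofList [x] ++ (String.ofList [y] ++ String.ofList r) := by
  rw [show x :: y :: r = [x] ++ ([y] ++ r) from by simp,
      String.ofList_append, String.ofList_append]

theorem pvLoop1_eq (l d : List Char) (acc : String) (h : l.length = d.length) :
    pvLoop1 l d acc = acc ++ String.ofList (pvFlat l.reverse d.reverse) := by
  induction l using List.reverseRecOn generalizing d acc with
  | nil =>
    have hd : d = [] := by simpa using h.symm
    subst hd
    simp [pvLoop1, pvFlat]
  | append_singleton l' x ih =>
    cases d using List.reverseRecOn with
    | nil => simp at h
    | append_singleton d' y =>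
      have h' : l'.length = d'.length := by simpa using h
      rw [pvLoop1, if_neg (by simp), List.dropLast_concat, List.dropLast_concat, ih d' _ h']
      simp [pvFlat, pvOfList_cons₂, String.append_assoc]

theorem pvLoop2_eq (l d : List Char) (acc : String) (h : d.length ≤ l.length) :
    pvLoop2 l d acc =
      (acc ++ String.ofList (pvFlat l.reverse d.reverse), l.take (l.length - d.length)) := by
  induction d using List.reverseRecOn generalizing l acc with
  | nil => simp [pvLoop2, pvFlat]
  | append_singleton d' y ih =>
    cases l using List.reverseRecOn with
    | nil => simp at h
    | append_singleton l' x =>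
      have h' : d'.length ≤ l'.length := by simpa using h
      rw [pvLoop2, if_neg (by simp), List.dropLast_concat, List.dropLast_concat, ih l' _ h']
      simp only [Prod.mk.injEq]
      refine ⟨by simp [pvFlat, pvOfList_cons₂, String.append_assoc], ?_⟩
      have he : (l' ++ [x]).length - (d' ++ [y]).length = l'.length - d'.length := by
        simp
      rw [he, List.take_append_of_le_length (by omega)]

theorem pvLoop3_eq (l d : List Char) (acc : String) (h : l.length ≤ d.length) :
    pvLoop3 l d acc =
      (acc ++ String.ofList (pvFlat d.reverse l.reverse), d.take (d.length - l.length)) := by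
  induction l using List.reverseRecOn generalizing d acc with
  | nil => simp [pvLoop3, pvFlat]
  | append_singleton l' x ih =>
    cases d using List.reverseRecOn with
    | nil => simp at h
    | append_singleton d' y =>
      have h' : l'.length ≤ d'.length := by simpa using h
      rw [pvLoop3, if_neg (by simp), List.dropLast_concat, List.dropLast_concat, ih d' _ h']
      simp only [Prod.mk.injEq]
      refine ⟨by simp [pvFlat, pvOfList_cons₂, String.append_assoc], ?_⟩
      have he : (d' ++ [y]).length - (l' ++ [x]).length = d'.length - l'.length := by
        simp
      rw [he, List.take_append_of_le_length (by omega)]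

theorem pvPartition_eq (cs : List Char) (l0 d0 : List Char) :
    cs.foldl
      (fun (ld : List Char × List Char) c =>
        if PySem.Chars.isdigit c then (ld.1, ld.2 ++ [c]) else (ld.1 ++ [c], ld.2))
      (l0, d0)
      = (l0 ++ cs.filter (fun c => !PySem.Chars.isdigit c),
         d0 ++ cs.filter (fun c => PySem.Chars.isdigit c)) := by
  induction cs generalizing l0 d0 with
  | nil => simp
  | cons c cs ih =>
    simp only [List.foldl_cons, List.filter_cons]
    by_cases hc : PySem.Chars.isdigit c <;> simp [hc, ih]

theorem pvZipFold_eq (ps : List (Char × Char)) (acc : List Char) :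
    ps.foldl (fun (out : List Char) p => out ++ [p.1, p.2]) acc
      = acc ++ ps.flatMap (fun p => [p.1, p.2]) := by
  induction ps generalizing acc with
  | nil => simp
  | cons p ps ih => simp [ih]

-- ===== VERDICT (by name: the statement is the Claim_ definition above) =====
theorem reformat_spec : Claim_equal_reformat := by
  intro s _
  unfold Spec_reformat reformat reformat_alt
  simp only [pvPartition_eq, List.nil_append, List.filter_reverse, List.length_reverse]
  generalize List.filter (fun c => !PySem.Chars.isdigit c) s.toList = L
  generalize List.filter (fun c => PySem.Chars.isdigit c) s.toList = D
  by_cases h1 : ((L.length : Int) - D.length).natAbs > 1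
  · simp [h1]
  · simp only [h1, if_false]
    by_cases h2 : (L.length : Int) = (D.length : Int)
    · have hnm : L.length = D.length := by exact_mod_cast h2
      have hgt : ¬ D.length > L.length := by omega
      rw [if_pos h2, if_neg hgt, pvLoop1_eq L D "" hnm, pvZipFold_eq]
      have hd : List.drop D.length L.reverse = [] :=
        List.drop_eq_nil_of_le (by simp [hnm])
      simp [pvFlat, hd]
    · by_cases h3 : (L.length : Int) > (D.length : Int)
      · have hn : L.length = D.length + 1 := by omega
        have hgt : ¬ D.length > L.length := by omega
        rw [if_neg h2, if_pos h3, if_neg hgt,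
            pvLoop2_eq L D "" (by omega), pvZipFold_eq]
        obtain ⟨c, L', rfl⟩ : ∃ c L', L = c :: L' := by
          cases L with
          | nil => simp at hn
          | cons a t => exact ⟨a, t, rfl⟩
        have hL' : L'.length = D.length := by simpa using hn
        have hdrop : List.drop D.length (L'.reverse ++ [c]) = [c] := by
          rw [← hL', ← List.length_reverse (as := L'), List.drop_left]
        simp [pvFlat, hn, hdrop]
      · have hm : D.length = L.length + 1 := by omega
        have hgt : D.length > L.length := by omega
        rw [if_neg h2, if_neg h3, if_pos hgt,
            pvLoop3_eq L D "" (by omega), pvZipFold_eq]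
        obtain ⟨c, D', rfl⟩ : ∃ c D', D = c :: D' := by
          cases D with
          | nil => simp at hm
          | cons a t => exact ⟨a, t, rfl⟩
        have hD' : D'.length = L.length := by simpa using hm
        have hdrop : List.drop L.length (D'.reverse ++ [c]) = [c] := by
          rw [← hD', ← List.length_reverse (as := D'), List.drop_left]
        simp [pvFlat, hm, hdrop]
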